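-- pv_equiv track=rewrite | github.com/Wawanahayy/discord-chat | done.py | strip_greetings
-- ===== SOURCE A (Python) =====
-- BANNED_GREETINGS = [
--     "good morning", "good afternoon", "good evening",
--     "selamat pagi", "selamat siang", "selamat malam"
-- ]
--
-- def strip_greetings(text: str) -> str:
--     t = text.strip()
--     low = t.lower()
--     for g in BANNED_GREETINGS:
--         if low.startswith(g):
--             t = t[len(g):].lstrip(" ,.-!?")
--             break
--     return t
-- ===== SOURCE B (Python) =====
-- # B: a prefix trie built once from the greetings; matching is a single
-- # character-by-character walk of the trie instead of a startswith scan per greeting.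
-- BANNED_GREETINGS = [
--     "good morning", "good afternoon", "good evening",
--     "selamat pagi", "selamat siang", "selamat malam"
-- ]
--
-- def _build_trie():
--     root = {}
--     for g in BANNED_GREETINGS:
--         node = root
--         for c in g:
--             node = node.setdefault(c, {})
--         node[None] = True  # terminal marker
--     return root
--
-- _TRIE = _build_trie()
--
-- def strip_greetings(text: str) -> str:
--     t = text.strip()
--     node = _TRIE
--     i = 0
--     for c in t.lower():
--         if None in node:
--             break
--         nxt = node.get(c)
--         if nxt is None:
--             return t
--         node = nxt
--         i += 1
--     if None in node:
--         return t[i:].lstrip(" ,.-!?")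
--     return t
-- ===== Notes on version B (the rewrite author's own statement) =====
-- stated objective: alternative
-- what changed: B builds a prefix trie (nested dicts) from the greetings once and matches by a single character-by-character walk of the trie, instead of A's startswith scan over the greeting list.
import Mathlib
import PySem

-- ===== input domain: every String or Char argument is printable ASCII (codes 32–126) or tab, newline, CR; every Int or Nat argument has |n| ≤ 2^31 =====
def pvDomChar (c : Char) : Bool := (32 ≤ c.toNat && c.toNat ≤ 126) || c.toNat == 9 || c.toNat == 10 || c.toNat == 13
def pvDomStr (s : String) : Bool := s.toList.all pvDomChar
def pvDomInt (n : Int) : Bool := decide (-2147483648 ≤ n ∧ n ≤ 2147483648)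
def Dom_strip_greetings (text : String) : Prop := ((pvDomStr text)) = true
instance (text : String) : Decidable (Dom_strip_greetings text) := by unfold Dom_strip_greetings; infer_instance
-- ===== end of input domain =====

-- B builds a prefix trie from the greetings once and matches by a single
-- character-by-character walk of the trie instead of a startswith scan per greeting
-- (objective: alternative).

-- ===== PORT A =====
def BANNED_GREETINGS : List String :=
  ["good morning", "good afternoon", "good evening",
   "selamat pagi", "selamat siang", "selamat malam"]

-- t.lstrip(" ,.-!?") : drop leading chars belonging to the set (exact: CPython str.lstrip(chars))
def pvLstripPunct (t : String) : String :=
  String.ofList (t.toList.dropWhile (fun c => (" ,.-!?".toList).contains c))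

-- the 'for g in BANNED_GREETINGS: if low.startswith(g): t = t[len(g):].lstrip(...); break'
def stripLoopA (t low : String) : List String → String
  | [] => t
  | g :: gs =>
    if PySem.Str.startswith low g then
      pvLstripPunct (PySem.Str.slice t (some (PySem.Str.len g : Int)) none)
    else stripLoopA t low gs

def strip_greetings (text : String) : String :=
  let t := PySem.Str.strip text
  let low := PySem.Str.lower t
  stripLoopA t low BANNED_GREETINGS

-- ===== PORT B =====
-- the trie: a node is 'node terminal kids'; kids is an explicit association list
-- of (char, child) in insertion order (the Python dict)
mutual
inductive PTrie where
  | node : Bool → PKids → PTrie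
inductive PKids where
  | nil : PKids
  | cons : Char → PTrie → PKids → PKids
end

-- node.get(c): first (only) kid labelled c
def getKid? : PKids → Char → Option PTrie
  | .nil, _ => none
  | .cons d t k, c => if d = c then some t else getKid? k c

-- node.setdefault(c, {}): existing kid for c, else a fresh empty node
def getKidD (k : PKids) (c : Char) : PTrie :=
  match getKid? k c with
  | some t => t
  | none => .node false .nil

-- write back the (possibly new) kid for c, keeping dict insertion order
def setKid : PKids → Char → PTrie → PKids
  | .nil, c, t' => .cons c t' .nil
  | .cons d t k, c, t' => if d = c then .cons d t' k else .cons d t (setKid k c t')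

-- the inner 'for c in g: node = node.setdefault(c, {})' + terminal mark
def insertT : PTrie → List Char → PTrie
  | .node _ k, [] => .node true k
  | .node b k, c :: cs => .node b (setKid k c (insertT (getKidD k c) cs))

-- _build_trie(): fold the greetings into an empty root
def TRIE : PTrie :=
  BANNED_GREETINGS.foldl (fun t g => insertT t g.toList) (.node false .nil)

-- the walk loop: 'for c in t.lower(): …'; returns the number of chars consumed
-- up to a terminal node (some i) or none when the walk falls off the trie
def walk : List Char → PTrie → Option Nat
  | l, .node b k =>
    if b then some 0 else
    match l with
    | [] => none
    | c :: cs =>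
      match getKid? k c with
      | none => none
      | some t' => (walk cs t').map (· + 1)

def strip_greetings_alt (text : String) : String :=
  let t := PySem.Str.strip text
  match walk (PySem.Str.lower t).toList TRIE with
  | some i => pvLstripPunct (PySem.Str.slice t (some (i : Int)) none)
  | none => t

-- ===== PRECONDITION & SPEC =====
def Spec_strip_greetings (text : String) (out : String) : Prop := out = strip_greetings_alt text
instance (text : String) (out : String) : Decidable (Spec_strip_greetings text out) := by unfold Spec_strip_greetings; infer_instance

-- ===== CLAIM (what is proved, stated in full; the proofs are below) =====
def Claim_equal_strip_greetings : Prop := ∀ (text : String), Dom_strip_greetings text → Spec_strip_greetings text (strip_greetings text)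

-- ===== LEMMAS AND PROOFS =====

-- all terminal paths of a trie / of a kid list
mutual
def termPathsT : PTrie → List (List Char)
  | .node b k => (if b then [[]] else []) ++ termPathsK k
def termPathsK : PKids → List (List Char)
  | .nil => []
  | .cons c t k => (termPathsT t).map (c :: ·) ++ termPathsK k
end

theorem getKid?_paths : ∀ (k : PKids) (c : Char) (t : PTrie), getKid? k c = some t →
    ∀ (p : List Char), p ∈ termPathsT t → (c :: p) ∈ termPathsK k
  | .nil, c, t, h, p, hp => by simp [getKid?] at h
  | .cons d t' k, c, t, h, p, hp => by
    by_cases hd : d = c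
    · subst hd
      simp [getKid?] at h
      subst h
      simp [termPathsK]
      exact Or.inl hp
    · simp [getKid?, hd] at h
      simp [termPathsK]
      exact Or.inr (getKid?_paths k c t h p hp)

-- a successful walk follows some terminal path of the trie
theorem walk_sound : ∀ (l : List Char) (t : PTrie) (n : Nat), walk l t = some n →
    ∃ p, p ∈ termPathsT t ∧ p <+: l ∧ p.length = n := by
  intro l
  induction l with
  | nil =>
    intro t n h
    obtain ⟨b, k⟩ := t
    cases b with
    | true => simp [walk] at h; exact ⟨[], by simp [termPathsT], by simp, by simp [h]⟩
    | false => simp [walk] at h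
  | cons c cs ih =>
    intro t n h
    obtain ⟨b, k⟩ := t
    cases b with
    | true => simp [walk] at h; exact ⟨[], by simp [termPathsT], by simp, by simp [h]⟩
    | false =>
      simp only [walk, Bool.false_eq_true, if_false] at h
      cases hk : getKid? k c with
      | none => rw [hk] at h; simp at h
      | some t' =>
        rw [hk] at h
        simp only [Option.map_eq_some_iff] at h
        obtain ⟨m, hw, hm⟩ := h
        obtain ⟨p, hp, hpre, hlen⟩ := ih t' m hw
        refine ⟨c :: p, ?_, ?_, ?_⟩
        · simpa [termPathsT] using getKid?_paths k c t' hk p hp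
        · exact List.cons_prefix_cons.mpr ⟨rfl, hpre⟩
        · simp [hlen, hm]

-- the terminal paths of the concrete trie are exactly the greetings
theorem termPaths_TRIE :
    termPathsT TRIE = BANNED_GREETINGS.map String.toList := by
  simp [TRIE, BANNED_GREETINGS, insertT, getKidD, getKid?, setKid, termPathsT, termPathsK, List.foldl]

theorem walk_term (l : List Char) (k : PKids) : walk l (.node true k) = some 0 := by
  cases l <;> simp [walk]

-- if a greeting is a prefix of the lowered text, the walk consumes exactly that greeting
theorem walk_gm (rest : List Char) : walk ("good morning".toList ++ rest) TRIE = some 12 := by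
  simp [walk, TRIE, BANNED_GREETINGS, insertT, getKidD, getKid?, setKid, List.foldl, walk_term]
theorem walk_ga (rest : List Char) : walk ("good afternoon".toList ++ rest) TRIE = some 14 := by
  simp [walk, TRIE, BANNED_GREETINGS, insertT, getKidD, getKid?, setKid, List.foldl, walk_term]
theorem walk_ge (rest : List Char) : walk ("good evening".toList ++ rest) TRIE = some 12 := by
  simp [walk, TRIE, BANNED_GREETINGS, insertT, getKidD, getKid?, setKid, List.foldl, walk_term]
theorem walk_sp (rest : List Char) : walk ("selamat pagi".toList ++ rest) TRIE = some 12 := by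
  simp [walk, TRIE, BANNED_GREETINGS, insertT, getKidD, getKid?, setKid, List.foldl, walk_term]
theorem walk_ss (rest : List Char) : walk ("selamat siang".toList ++ rest) TRIE = some 13 := by
  simp [walk, TRIE, BANNED_GREETINGS, insertT, getKidD, getKid?, setKid, List.foldl, walk_term]
theorem walk_sm (rest : List Char) : walk ("selamat malam".toList ++ rest) TRIE = some 13 := by
  simp [walk, TRIE, BANNED_GREETINGS, insertT, getKidD, getKid?, setKid, List.foldl, walk_term]

theorem pv_len_gm : PySem.Str.len "good morning" = (12 : Int) := by decide
theorem pv_len_ge : PySem.Str.len "good evening" = (12 : Int) := by decide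
theorem pv_len_sp : PySem.Str.len "selamat pagi" = (12 : Int) := by decide
theorem pv_len_ss : PySem.Str.len "selamat siang" = (13 : Int) := by decide
theorem pv_len_sm : PySem.Str.len "selamat malam" = (13 : Int) := by decide
theorem pv_len_ga : PySem.Str.len "good afternoon" = (14 : Int) := by decide

-- walk on the full lowered text, from a greeting prefix
theorem walk_of_prefix {g : String} {L : List Char} (n : Nat)
    (h : g.toList <+: L)
    (hw : ∀ rest, walk (g.toList ++ rest) TRIE = some n) :
    walk L TRIE = some n := by
  obtain ⟨rest, hr⟩ := h
  rw [← hr]; exact hw rest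

theorem strip_greetings_eq_alt (text : String) :
    strip_greetings text = strip_greetings_alt text := by
  unfold strip_greetings strip_greetings_alt
  generalize PySem.Str.strip text = t
  simp only [BANNED_GREETINGS, stripLoopA, PySem.Str.startswith_eq, PySem.Str.toList_lower,
    PySem.Chars.startswith_iff]
  generalize PySem.Chars.lower t.toList = L
  by_cases hgm : ("good morning" : String).toList <+: L
  · rw [walk_of_prefix 12 hgm walk_gm, if_pos hgm, pv_len_gm]; rfl
  · rw [if_neg hgm]
    by_cases hga : ("good afternoon" : String).toList <+: L
    · rw [walk_of_prefix 14 hga walk_ga, if_pos hga, pv_len_ga]; rfl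
    · rw [if_neg hga]
      by_cases hge : ("good evening" : String).toList <+: L
      · rw [walk_of_prefix 12 hge walk_ge, if_pos hge, pv_len_ge]; rfl
      · rw [if_neg hge]
        by_cases hsp : ("selamat pagi" : String).toList <+: L
        · rw [walk_of_prefix 12 hsp walk_sp, if_pos hsp, pv_len_sp]; rfl
        · rw [if_neg hsp]
          by_cases hss : ("selamat siang" : String).toList <+: L
          · rw [walk_of_prefix 13 hss walk_ss, if_pos hss, pv_len_ss]; rfl
          · rw [if_neg hss]
            by_cases hsm : ("selamat malam" : String).toList <+: L
            · rw [walk_of_prefix 13 hsm walk_sm, if_pos hsm, pv_len_sm]; rfl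
            · rw [if_neg hsm]
              -- no greeting is a prefix: the walk must fail
              have hnone : walk L TRIE = none := by
                cases hw : walk L TRIE with
                | none => rfl
                | some n =>
                  obtain ⟨p, hp, hpre, _⟩ := walk_sound _ _ _ hw
                  rw [termPaths_TRIE] at hp
                  simp [BANNED_GREETINGS] at hp
                  rcases hp with h | h | h | h | h | h <;> subst h <;>
                    first
                    | exact absurd hpre hgm
                    | exact absurd hpre hga
                    | exact absurd hpre hge
                    | exact absurd hpre hsp
                    | exact absurd hpre hss
                    | exact absurd hpre hsm
              rw [hnone]

-- ===== VERDICT (by name: the statement is the Claim_ definition above) =====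
theorem strip_greetings_spec : Claim_equal_strip_greetings := by
  intro text _
  unfold Spec_strip_greetings
  exact strip_greetings_eq_alt text
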